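-- pv_equiv track=rewrite | github.com/ColtonMatth/Kattis-Problems | zagrade.py | all_possible
-- ===== SOURCE A (Python) =====
-- from itertools import combinations
--
-- def all_possible(original, pairs):
--     n = len(pairs)
--     collect = set()
--     for i in range(1, n + 1):
--         for r in combinations(pairs, i):
--             remove = {index for pair in r for index in pair}
--             collect.add(''.join(c for i, c in enumerate(original) if i not in remove))
--     return sorted(collect)
-- ===== SOURCE B (Python) =====
-- def all_possible(original, pairs):
--     result = set()
--
--     def go(rest, removed):
--         if not rest:
--             if removed:
--                 result.add(''.join(c for i, c in enumerate(original) if i not in removed))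
--             return
--         (a, b) = rest[0]
--         rest2 = rest[1:]
--         go(rest2, removed | {a, b})
--         go(rest2, removed)
--
--     go(pairs, set())
--     return sorted(result)
-- ===== Notes on version B (the rewrite author's own statement) =====
-- stated objective: alternative
-- what changed: the size-by-size combinations double loop is replaced by a single binary recursion over the pairs list that branches remove/keep per pair while carrying the accumulated removed-index set
import Mathlib
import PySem

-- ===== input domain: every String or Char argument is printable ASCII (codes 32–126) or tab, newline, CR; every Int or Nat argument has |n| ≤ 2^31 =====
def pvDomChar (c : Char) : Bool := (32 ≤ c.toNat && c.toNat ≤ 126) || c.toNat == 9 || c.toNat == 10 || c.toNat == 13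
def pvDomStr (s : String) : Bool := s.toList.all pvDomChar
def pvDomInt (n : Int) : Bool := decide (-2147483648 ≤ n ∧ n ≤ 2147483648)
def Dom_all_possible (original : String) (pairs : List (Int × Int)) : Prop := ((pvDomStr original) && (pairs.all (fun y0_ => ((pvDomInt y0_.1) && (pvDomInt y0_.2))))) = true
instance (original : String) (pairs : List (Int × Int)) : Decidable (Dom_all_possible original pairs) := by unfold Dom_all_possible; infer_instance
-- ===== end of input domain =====

-- B replaces A's size-by-size combinations loops with one binary remove/keep recursion over the pairs (alternative decomposition, same cost).

-- ===== PORT A =====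
-- ''.join(c for i, c in enumerate(original) if i not in removed)  (shared verbatim by A and B)
def pvMask (original : String) (removed : List Int) : String :=
  String.mk (((PySem.List.enumerate original.toList 0).filter
    (fun ic => !(PySem.Set.contains removed ic.1))).map Prod.snd)

-- {index for pair in r for index in pair}, before dedup
def pvIdxs (r : List (Int × Int)) : List Int := r.flatMap (fun p => [p.1, p.2])

-- itertools.combinations(xs, k), in itertools order
def pvCombos : Nat → List (Int × Int) → List (List (Int × Int))
  | 0, _ => [[]]
  | _+1, [] => []
  | k+1, x :: xs => (pvCombos k xs).map (fun t => x :: t) ++ pvCombos (k+1) xs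

def all_possible (original : String) (pairs : List (Int × Int)) : List String :=
  let n : Int := PySem.List.len pairs
  let collect : PySem.Set String :=
    (PySem.List.pyRange 1 (n+1) 1).foldl
      (fun collect i =>
        (pvCombos i.toNat pairs).foldl
          (fun collect r =>
            let remove : PySem.Set Int := PySem.Set.ofList (pvIdxs r)
            PySem.Set.add collect (pvMask original remove))
          collect)
      PySem.Set.empty
  PySem.List.sorted collect (fun x => x) false

-- ===== PORT B =====
def pvGo (original : String) : List (Int × Int) → PySem.Set Int → PySem.Set String → PySem.Set String
  | [], removed, result =>
      if removed ≠ [] then PySem.Set.add result (pvMask original removed) else result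
  | p :: rest, removed, result =>
      pvGo original rest removed
        (pvGo original rest (PySem.Set.union removed (PySem.Set.ofList [p.1, p.2])) result)

def all_possible_alt (original : String) (pairs : List (Int × Int)) : List String :=
  PySem.List.sorted (pvGo original pairs PySem.Set.empty PySem.Set.empty) (fun x => x) false

-- ===== PRECONDITION & SPEC =====
def Spec_all_possible (original : String) (pairs : List (Int × Int)) (out : List String) : Prop := out = all_possible_alt original pairs
instance (original : String) (pairs : List (Int × Int)) (out : List String) : Decidable (Spec_all_possible original pairs out) := by unfold Spec_all_possible; infer_instance

-- ===== CLAIM (what is proved, stated in full; the proofs are below) =====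
def Claim_equal_all_possible : Prop := ∀ (original : String) (pairs : List (Int × Int)), Dom_all_possible original pairs → Spec_all_possible original pairs (all_possible original pairs)

-- ===== LEMMAS AND PROOFS =====

-- all subsets of a list, as sublists (proof-only helper)
def pvSubs : List (Int × Int) → List (List (Int × Int))
  | [] => [[]]
  | x :: xs => (pvSubs xs).map (fun t => x :: t) ++ pvSubs xs

theorem pvMask_congr (original : String) (rm1 rm2 : List Int)
    (h : ∀ x, x ∈ rm1 ↔ x ∈ rm2) : pvMask original rm1 = pvMask original rm2 := by
  unfold pvMask
  congr 1
  congr 1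
  apply List.filter_congr
  intro ic _
  congr 1
  by_cases hm : ic.1 ∈ rm1
  · rw [(PySem.Set.contains_iff _ _).2 hm, (PySem.Set.contains_iff _ _).2 ((h ic.1).1 hm)]
  · have hm2 : ic.1 ∉ rm2 := fun hx => hm ((h ic.1).2 hx)
    cases hc1 : PySem.Set.contains rm1 ic.1 with
    | false =>
      cases hc2 : PySem.Set.contains rm2 ic.1 with
      | false => rfl
      | true => exact absurd ((PySem.Set.contains_iff _ _).1 hc2) hm2
    | true => exact absurd ((PySem.Set.contains_iff _ _).1 hc1) hm

theorem mem_pvCombos (r : List (Int × Int)) :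
    ∀ (xs : List (Int × Int)) (k : Nat), r ∈ pvCombos k xs ↔ r ∈ pvSubs xs ∧ r.length = k := by
  intro xs
  induction xs generalizing r with
  | nil =>
    intro k
    cases k with
    | zero => simp [pvCombos, pvSubs]
    | succ k => simp [pvCombos, pvSubs]; rintro rfl; simp
  | cons x xs ih =>
    intro k
    cases k with
    | zero =>
      simp only [pvCombos, pvSubs, List.mem_singleton, List.mem_append, List.mem_map,
        List.length_eq_zero_iff]
      constructor
      · rintro rfl
        have h0 := ((ih ([] : List (Int × Int)) 0).1 (by simp [pvCombos])).1
        exact ⟨Or.inr h0, rfl⟩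
      · rintro ⟨_, rfl⟩; rfl
    | succ k =>
      simp only [pvCombos, pvSubs, List.mem_append, List.mem_map]
      constructor
      · rintro (⟨t, ht, rfl⟩ | h)
        · have := (ih t k).1 ht
          exact ⟨Or.inl ⟨t, this.1, rfl⟩, by simp [this.2]⟩
        · have := (ih r (k+1)).1 h
          exact ⟨Or.inr this.1, this.2⟩
      · rintro ⟨(⟨t, ht, rfl⟩ | h), hlen⟩
        · exact Or.inl ⟨t, (ih t k).2 ⟨ht, by simpa using hlen⟩, rfl⟩
        · exact Or.inr ((ih r (k+1)).2 ⟨h, hlen⟩)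

theorem length_le_of_mem_pvSubs (r : List (Int × Int)) :
    ∀ (xs : List (Int × Int)), r ∈ pvSubs xs → r.length ≤ xs.length := by
  intro xs
  induction xs generalizing r with
  | nil => intro h; simp [pvSubs] at h; subst h; simp
  | cons x xs ih =>
    simp only [pvSubs, List.mem_append, List.mem_map]
    rintro (⟨t, ht, rfl⟩ | h)
    · simpa using Nat.succ_le_succ (ih t ht)
    · exact Nat.le_succ_of_le (ih r h)

theorem nodup_foldl_add {β : Type} (f : β → String) :
    ∀ (l : List β) (s : PySem.Set String), s.Nodup →
      (l.foldl (fun s b => PySem.Set.add s (f b)) s).Nodup := by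
  intro l
  induction l with
  | nil => intro s h; exact h
  | cons b l ih => intro s h; exact ih _ (PySem.Set.nodup_add _ _ h)

theorem a_fold_char (original : String) (pairs : List (Int × Int)) (I : List Int) :
    ∀ (acc : PySem.Set String), acc.Nodup →
      (I.foldl
        (fun collect i =>
          (pvCombos i.toNat pairs).foldl
            (fun collect r =>
              PySem.Set.add collect (pvMask original (PySem.Set.ofList (pvIdxs r))))
            collect)
        acc).Nodup ∧
      ∀ s, s ∈ (I.foldl
        (fun collect i =>
          (pvCombos i.toNat pairs).foldl
            (fun collect r =>
              PySem.Set.add collect (pvMask original (PySem.Set.ofList (pvIdxs r))))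
            collect)
        acc) ↔ s ∈ acc ∨ ∃ i ∈ I, ∃ r ∈ pvCombos i.toNat pairs,
            s = pvMask original (PySem.Set.ofList (pvIdxs r)) := by
  induction I with
  | nil => intro acc h; simp [h]
  | cons i I ih =>
    intro acc h
    have hstep : ((pvCombos i.toNat pairs).foldl
        (fun collect r =>
          PySem.Set.add collect (pvMask original (PySem.Set.ofList (pvIdxs r)))) acc).Nodup :=
      nodup_foldl_add _ _ _ h
    obtain ⟨hn, hm⟩ := ih _ hstep
    refine ⟨hn, fun s => ?_⟩
    rw [List.foldl_cons, hm s, PySem.Set.mem_foldl_add]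
    simp only [List.mem_cons]
    constructor
    · rintro ((hs | ⟨r, hr, rfl⟩) | ⟨j, hj, hr⟩)
      · exact Or.inl hs
      · exact Or.inr ⟨i, Or.inl rfl, r, hr, rfl⟩
      · exact Or.inr ⟨j, Or.inr hj, hr⟩
    · rintro (hs | ⟨j, (rfl | hj), r, hr, rfl⟩)
      · exact Or.inl (Or.inl hs)
      · exact Or.inl (Or.inr ⟨r, hr, rfl⟩)
      · exact Or.inr ⟨j, hj, r, hr, rfl⟩

theorem b_go_char (original : String) :
    ∀ (rest : List (Int × Int)) (removed : PySem.Set Int) (result : PySem.Set String),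
      removed.Nodup → result.Nodup →
      (pvGo original rest removed result).Nodup ∧
      ∀ s, s ∈ pvGo original rest removed result ↔
        s ∈ result ∨ ∃ sub ∈ pvSubs rest, (removed ≠ [] ∨ sub ≠ []) ∧
          s = pvMask original (removed ++ pvIdxs sub) := by
  intro rest
  induction rest with
  | nil =>
    intro removed result hrm hres
    simp only [pvGo, pvSubs, List.mem_singleton]
    by_cases hne : removed ≠ []
    · rw [if_pos hne]
      refine ⟨PySem.Set.nodup_add _ _ hres, fun s => ?_⟩
      rw [PySem.Set.mem_add]
      constructor
      · rintro (hs | rfl)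
        · exact Or.inl hs
        · exact Or.inr ⟨[], rfl, Or.inl hne, by simp [pvIdxs]⟩
      · rintro (hs | ⟨sub, rfl, _, rfl⟩)
        · exact Or.inl hs
        · exact Or.inr (by simp [pvIdxs])
    · rw [if_neg hne]
      push_neg at hne
      refine ⟨hres, fun s => ?_⟩
      constructor
      · intro hs; exact Or.inl hs
      · rintro (hs | ⟨sub, rfl, h, _⟩)
        · exact hs
        · rcases h with h | h
          · exact absurd hne h
          · exact absurd rfl h
  | cons p rest ih =>
    intro removed result hrm hres
    simp only [pvGo]
    have hrm' : (PySem.Set.union removed (PySem.Set.ofList [p.1, p.2])).Nodup :=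
      PySem.Set.nodup_union _ _ hrm
    obtain ⟨hn1, hm1⟩ := ih (PySem.Set.union removed (PySem.Set.ofList [p.1, p.2])) result hrm' hres
    obtain ⟨hn2, hm2⟩ := ih removed _ hrm hn1
    refine ⟨hn2, fun s => ?_⟩
    rw [hm2 s]
    simp only [hm1 s, pvSubs, List.mem_append, List.mem_map]
    constructor
    · rintro ((hs | ⟨sub, hsub, hne, rfl⟩) | ⟨sub, hsub, hne, rfl⟩)
      · exact Or.inl hs
      · -- remove branch: corresponds to sub' = p :: sub
        refine Or.inr ⟨p :: sub, Or.inl ⟨sub, hsub, rfl⟩, Or.inr (by simp), ?_⟩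
        apply pvMask_congr
        intro x
        simp [pvIdxs, PySem.Set.mem_union, PySem.Set.mem_ofList]
        simp [or_assoc]
      · -- keep branch
        exact Or.inr ⟨sub, Or.inr hsub, hne, rfl⟩
    · rintro (hs | ⟨sub', (⟨sub, hsub, rfl⟩ | hsub), hne, rfl⟩)
      · exact Or.inl (Or.inl hs)
      · -- sub' = p :: sub matches the remove branch
        refine Or.inl (Or.inr ⟨sub, hsub, Or.inl ?_, ?_⟩)
        · intro hnil
          have : p.1 ∈ PySem.Set.union removed (PySem.Set.ofList [p.1, p.2]) := by
            rw [PySem.Set.mem_union]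
            exact Or.inr (by rw [PySem.Set.mem_ofList]; simp)
          rw [hnil] at this
          simp at this
        · apply pvMask_congr
          intro x
          simp [pvIdxs, PySem.Set.mem_union, PySem.Set.mem_ofList]
          simp [or_assoc]
      · exact Or.inr ⟨sub', hsub, hne, rfl⟩

theorem mem_collect_iff (original : String) (pairs : List (Int × Int)) (s : String) :
    (s ∈ (PySem.List.pyRange 1 ((PySem.List.len pairs)+1) 1).foldl
      (fun collect i =>
        (pvCombos i.toNat pairs).foldl
          (fun collect r =>
            PySem.Set.add collect (pvMask original (PySem.Set.ofList (pvIdxs r))))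
          collect)
      PySem.Set.empty) ↔
    (∃ r ∈ pvSubs pairs, r ≠ [] ∧ s = pvMask original (pvIdxs r)) := by
  obtain ⟨_, hm⟩ := a_fold_char original pairs
    (PySem.List.pyRange 1 ((PySem.List.len pairs)+1) 1) PySem.Set.empty List.nodup_nil
  rw [hm s]
  have hmask : ∀ r : List (Int × Int),
      pvMask original (PySem.Set.ofList (pvIdxs r)) = pvMask original (pvIdxs r) := by
    intro r
    exact pvMask_congr _ _ _ (fun x => PySem.Set.mem_ofList _ _)
  constructor
  · rintro (hs | ⟨i, hi, r, hr, rfl⟩)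
    · simp [PySem.Set.empty] at hs
    · obtain ⟨hsub, hlen⟩ := (mem_pvCombos r pairs i.toNat).1 hr
      rw [PySem.List.mem_pyRange_one] at hi
      refine ⟨r, hsub, ?_, hmask r⟩
      intro hnil
      subst hnil
      simp at hlen
      omega
  · rintro ⟨r, hsub, hne, rfl⟩
    refine Or.inr ⟨(r.length : Int), ?_, r, ?_, (hmask r).symm⟩
    · rw [PySem.List.mem_pyRange_one]
      have h1 : 1 ≤ r.length := by
        cases r with
        | nil => exact absurd rfl hne
        | cons a t => simp
      have h2 : r.length ≤ pairs.length := length_le_of_mem_pvSubs r pairs hsub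
      simp [PySem.List.len]
      omega
    · exact (mem_pvCombos r pairs (r.length : Int).toNat).2 ⟨hsub, by simp⟩

-- ===== VERDICT (by name: the statement is the Claim_ definition above) =====
theorem all_possible_spec : Claim_equal_all_possible := by
  unfold Claim_equal_all_possible Spec_all_possible
  intro original pairs _
  unfold all_possible all_possible_alt
  simp only []
  apply PySem.List.sorted_eq_sorted_of_perm
  · intro a b h; exact h
  · obtain ⟨hnA, _⟩ := a_fold_char original pairs
      (PySem.List.pyRange 1 ((PySem.List.len pairs)+1) 1) PySem.Set.empty List.nodup_nil
    obtain ⟨hnB, hmB⟩ := b_go_char original pairs PySem.Set.empty PySem.Set.empty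
      List.nodup_nil List.nodup_nil
    rw [List.perm_ext_iff_of_nodup hnA hnB]
    intro s
    rw [mem_collect_iff original pairs s, hmB s]
    simp only [PySem.Set.empty, List.not_mem_nil, false_or, ne_eq, not_true_eq_false,
      false_or, List.nil_append]
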